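-- pv_equiv track=rewrite | github.com/Hyeyoung-Eum/beakjoon | 2024next/11052_카드구매하기.py | find_combinations
-- ===== SOURCE A (Python) =====
-- def find_combinations(n, k):
--     def backtrack(remaining_sum, k, start, path, result):
--         if k == 0:
--             if remaining_sum == 0:
--                 result.append(path[:])
--             return
--         for i in range(start, n + 1):
--             if remaining_sum - i >= 0:
--                 path.append(i)
--                 backtrack(remaining_sum - i, k - 1, 0, path, result)  # 0부터 시작해서 중복 허용
--                 path.pop()
--
--     result = []
--     backtrack(n, k, 0, [], result)
--     return result
-- ===== SOURCE B (Python) =====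
-- def find_combinations(n, k):
--     # Breadth-first, level-by-level: keep all partial tuples (with running sum
--     # <= n) of the current length, extend each by every feasible next value,
--     # stopping early once no partial tuple survives, then keep the complete
--     # tuples summing to n. No recursion, no shared path.
--     layer = [([], 0)]
--     for _ in range(k):
--         layer = [(t + [x], s + x) for (t, s) in layer for x in range(n + 1) if s + x <= n]
--         if not layer:
--             break
--     return [t for (t, s) in layer if s == n]
-- ===== Notes on version B (the rewrite author's own statement) =====
-- stated objective: alternative
-- what changed: Replaces the recursive depth-first backtracking over a shared mutable path with an iterative breadth-first construction: a list comprehension extends every partial tuple of the current length by each feasible value (pruning running sums above n, stopping early when no tuple survives), then a final filter keeps tuples summing to n.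
import Mathlib
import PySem

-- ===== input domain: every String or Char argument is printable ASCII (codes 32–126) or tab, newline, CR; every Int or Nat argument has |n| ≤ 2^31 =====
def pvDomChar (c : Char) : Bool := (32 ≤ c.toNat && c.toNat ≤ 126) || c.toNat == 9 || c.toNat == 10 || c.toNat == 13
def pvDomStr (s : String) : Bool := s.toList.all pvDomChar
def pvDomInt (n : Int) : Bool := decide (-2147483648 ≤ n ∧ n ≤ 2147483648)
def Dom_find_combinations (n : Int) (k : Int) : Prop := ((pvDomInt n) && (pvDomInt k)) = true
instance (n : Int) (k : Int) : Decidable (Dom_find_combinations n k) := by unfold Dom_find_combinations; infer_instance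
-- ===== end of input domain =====

-- B replaces A's recursive pruned backtracking by an iterative generate-and-filter
-- (build all k-tuples over range(n+1), then filter by sum); alternative structure, not faster.

-- ===== PORT A =====
-- backtrack(remaining_sum, k, start, path, result); the Python k counts down to 0,
-- so the Int k is ported as Nat fuel (k.toNat); Pre_ excludes the k<0, n≥0 inputs
-- where the Python recursion never terminates.
def pvBacktrack (n : Int) : Nat → Int → Int → List Int → List (List Int) → List (List Int)
  | 0, remaining, _start, path, result =>
      if remaining == 0 then result ++ [path] else result
  | fuel+1, remaining, start, path, result =>
      (PySem.List.pyRange start (n+1) 1).foldl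
        (fun res i =>
          if remaining - i ≥ 0 then pvBacktrack n fuel (remaining - i) 0 (path ++ [i]) res
          else res)
        result

def find_combinations (n : Int) (k : Int) : List (List Int) :=
  pvBacktrack n k.toNat n 0 [] []

-- ===== PORT B =====
-- the 'for _ in range(k): … if not layer: break' loop of Source B
def pvLayers (n : Int) : List Int → List (List Int × Int) → List (List Int × Int)
  | [], layer => layer
  | _ :: rest, layer =>
      let next := layer.flatMap (fun p =>
        ((PySem.List.pyRange 0 (n+1) 1).filter (fun x => p.2 + x ≤ n)).map
          (fun x => (p.1 ++ [x], p.2 + x)))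
      if next.isEmpty then next else pvLayers n rest next

def find_combinations_alt (n : Int) (k : Int) : List (List Int) :=
  let layer := pvLayers n (PySem.List.pyRange 0 k 1) [(([] : List Int), (0 : Int))]
  (layer.filter (fun p => p.2 == n)).map (fun p => p.1)

-- ===== PRECONDITION & SPEC =====
-- Pre_ excludes exactly the inputs (k < 0 with n ≥ 0) on which the Python A raises
-- RecursionError (backtrack recurses on k-1 forever).
def Pre_find_combinations (n : Int) (k : Int) : Prop := 0 ≤ k ∨ n < 0
instance (n : Int) (k : Int) : Decidable (Pre_find_combinations n k) := by
  unfold Pre_find_combinations; infer_instance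

def pvWitness_find_combinations : Int × Int := (3, 2)

def Spec_find_combinations (n : Int) (k : Int) (out : List (List Int)) : Prop :=
  out = find_combinations_alt n k
instance (n : Int) (k : Int) (out : List (List Int)) : Decidable (Spec_find_combinations n k out) := by
  unfold Spec_find_combinations; infer_instance

-- ===== CLAIM (what is proved, stated in full; the proofs are below) =====
def Claim_equal_find_combinations : Prop := ∀ (n : Int) (k : Int), Dom_find_combinations n k → Pre_find_combinations n k → Spec_find_combinations n k (find_combinations n k)

-- ===== LEMMAS AND PROOFS =====

-- all m-tuples over pool, lexicographic (head most significant)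
def prodK (pool : List Int) : Nat → List (List Int)
  | 0 => [[]]
  | m+1 => pool.flatMap (fun i => (prodK pool m).map (fun t => i :: t))

theorem flatMap_congr_mem {α β : Type} (l : List α) (f g : α → List β)
    (h : ∀ x ∈ l, f x = g x) : l.flatMap f = l.flatMap g := by
  induction l with
  | nil => rfl
  | cons a l ih =>
      simp only [List.flatMap_cons]
      rw [h a (by simp), ih (fun x hx => h x (by simp [hx]))]

theorem flatMap_single {α β : Type} (l : List α) (f : α → β) :
    l.flatMap (fun x => [f x]) = l.map f := by
  induction l with
  | nil => rfl
  | cons a l ih => simp [List.flatMap_cons, ih]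

-- snoc characterisation of prodK
theorem prodK_succ_snoc (pool : List Int) (m : Nat) :
    prodK pool (m+1) = (prodK pool m).flatMap (fun t => pool.map (fun x => t ++ [x])) := by
  induction m with
  | zero =>
      show pool.flatMap (fun i => [[i]]) = _
      simp [prodK, flatMap_single pool (fun i => [i])]
  | succ m ih =>
      have l1 : prodK pool (m+1+1)
          = pool.flatMap (fun i => (prodK pool (m+1)).map (fun t => i :: t)) := rfl
      have l2 : prodK pool (m+1)
          = pool.flatMap (fun i => (prodK pool m).map (fun t => i :: t)) := rfl
      rw [l1]
      conv_lhs => rw [ih]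
      conv_rhs => rw [l2]
      simp [List.map_flatMap, List.flatMap_map, List.flatMap_assoc, Function.comp_def]

theorem prodK_sum_nonneg (n : Int) (m : Nat) (t : List Int)
    (ht : t ∈ prodK (PySem.List.pyRange 0 (n+1) 1) m) : 0 ≤ t.sum := by
  induction m generalizing t with
  | zero => simp [prodK] at ht; simp [ht]
  | succ m ih =>
      simp only [prodK, List.mem_flatMap, List.mem_map] at ht
      obtain ⟨i, hi, t', ht', rfl⟩ := ht
      have h0 : (0:Int) ≤ i := (PySem.List.mem_pyRange_one.mp hi).1
      have := ih t' ht'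
      simp only [List.sum_cons]; omega

-- main invariant of A's backtracking (start = 0, as in every recursive call)
theorem pvBacktrack_eq (n : Int) (m : Nat) :
    ∀ (remaining : Int) (path : List Int) (res : List (List Int)),
    pvBacktrack n m remaining 0 path res =
      res ++ (((prodK (PySem.List.pyRange 0 (n+1) 1) m).filter
        (fun t => t.sum == remaining)).map (fun t => path ++ t)) := by
  induction m with
  | zero =>
      intro remaining path res
      show (if remaining == 0 then res ++ [path] else res) = _
      by_cases h : remaining = 0
      · subst h; simp [prodK]
      · have hb : (remaining == 0) = false := by simp [h]
        have hb2 : ((0:Int) == remaining) = false := by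
          simp only [beq_eq_false_iff_ne, ne_eq]; omega
        simp [prodK, hb, hb2]
  | succ m ih =>
      intro remaining path res
      show (PySem.List.pyRange 0 (n+1) 1).foldl _ res = _
      have hstep :
          (fun (res : List (List Int)) (i : Int) =>
            if remaining - i ≥ 0 then pvBacktrack n m (remaining - i) 0 (path ++ [i]) res
            else res)
          = (fun res i => res ++
              (if remaining - i ≥ 0 then
                ((prodK (PySem.List.pyRange 0 (n+1) 1) m).filter
                  (fun t => t.sum == remaining - i)).map (fun t => (path ++ [i]) ++ t)
               else [])) := by
        funext res i
        by_cases h : remaining - i ≥ 0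
        · rw [if_pos h, if_pos h]; exact ih (remaining - i) (path ++ [i]) res
        · rw [if_neg h, if_neg h, List.append_nil]
      rw [hstep, PySem.List.foldl_append_eq_flatMap]
      congr 1
      show _ = ((prodK _ (m+1)).filter (fun t => t.sum == remaining)).map (fun t => path ++ t)
      show _ = (((PySem.List.pyRange 0 (n+1) 1).flatMap
          (fun i => (prodK (PySem.List.pyRange 0 (n+1) 1) m).map (fun t => i :: t))).filter
          (fun t => t.sum == remaining)).map (fun t => path ++ t)
      rw [List.filter_flatMap, List.map_flatMap]
      apply flatMap_congr_mem
      intro i hi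
      have h0 : (0:Int) ≤ i := (PySem.List.mem_pyRange_one.mp hi).1
      by_cases h : remaining - i ≥ 0
      · simp only [if_pos h, List.filter_map, List.map_map]
        have hpred : ((fun t : List Int => t.sum == remaining) ∘ (fun t => i :: t))
            = (fun t : List Int => t.sum == remaining - i) := by
          funext t
          simp only [Function.comp, List.sum_cons]
          by_cases hs : t.sum = remaining - i
          · have h2 : i + t.sum = remaining := by omega
            simp [hs]
          · have h2 : i + t.sum ≠ remaining := by omega
            simp [hs, h2]
        rw [hpred]
        have hfun : (fun t : List Int => path ++ [i] ++ t)
            = ((fun t => path ++ t) ∘ (fun t => i :: t)) := by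
          funext t; simp
        rw [hfun]
      · simp only [if_neg h]
        rw [List.filter_map]
        have : (prodK (PySem.List.pyRange 0 (n+1) 1) m).filter
            ((fun t : List Int => t.sum == remaining) ∘ (fun t => i :: t)) = [] := by
          rw [List.filter_eq_nil_iff]
          intro t ht
          have hs := prodK_sum_nonneg n m t ht
          simp only [Function.comp, List.sum_cons]
          have : i + t.sum ≠ remaining := by omega
          simp [this]
        rw [this]; simp

-- B's loop builds, level by level, the pruned tuple lists
def prunedK (n : Int) (m : Nat) : List (List Int) :=
  (prodK (PySem.List.pyRange 0 (n+1) 1) m).filter (fun t => t.sum ≤ n)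

theorem iterate_step_empty (F : List (List Int × Int) → List (List Int × Int))
    (hF : F [] = []) : ∀ (m : Nat), F^[m] [] = [] := by
  intro m
  induction m with
  | zero => rfl
  | succ m ih => rw [Function.iterate_succ_apply, hF, ih]

-- the early 'break' does not change the final layer: once empty, it stays empty
theorem pvLayers_eq_iterate (n : Int) :
    ∀ (l : List Int) (layer : List (List Int × Int)),
    pvLayers n l layer
      = (fun ls : List (List Int × Int) => ls.flatMap (fun p =>
          ((PySem.List.pyRange 0 (n+1) 1).filter (fun x => p.2 + x ≤ n)).map
            (fun x => (p.1 ++ [x], p.2 + x))))^[l.length] layer := by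
  intro l
  induction l with
  | nil => intro layer; rfl
  | cons a rest ih =>
      intro layer
      simp only [pvLayers, List.length_cons, Function.iterate_succ_apply]
      by_cases h : (layer.flatMap (fun p =>
          ((PySem.List.pyRange 0 (n+1) 1).filter (fun x => p.2 + x ≤ n)).map
            (fun x => (p.1 ++ [x], p.2 + x)))) = []
      · rw [h]
        simp only [List.isEmpty_nil, if_true]
        exact (iterate_step_empty _ rfl rest.length).symm
      · rw [if_neg (by simpa [List.isEmpty_iff] using h)]
        exact ih _

theorem flatMap_filter {α β : Type} (l : List α) (p : α → Bool) (f : α → List β) :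
    (l.filter p).flatMap f = l.flatMap (fun a => if p a then f a else []) := by
  induction l with
  | nil => rfl
  | cons a l ih =>
      by_cases h : p a = true
      · simp [h, ih]
      · simp only [List.filter_cons]
        rw [if_neg (by simp [h])]
        simp [List.flatMap_cons, if_neg h, ih]

theorem iterate_layer (n : Int) (m : Nat) :
    (fun ls : List (List Int × Int) => ls.flatMap (fun p =>
      ((PySem.List.pyRange 0 (n+1) 1).filter (fun x => p.2 + x ≤ n)).map
        (fun x => (p.1 ++ [x], p.2 + x))))^[m+1] [(([] : List Int), (0 : Int))]
    = (prunedK n (m+1)).map (fun t => (t, t.sum)) := by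
  induction m with
  | zero =>
      rw [Function.iterate_one]
      show List.flatMap _ [(([] : List Int), (0 : Int))] = _
      simp only [List.flatMap_cons, List.flatMap_nil, List.append_nil]
      unfold prunedK
      have h1 : prodK (PySem.List.pyRange 0 (n+1) 1) 1
          = (PySem.List.pyRange 0 (n+1) 1).map (fun x => [x]) := by
        show (PySem.List.pyRange 0 (n+1) 1).flatMap (fun i => [[i]]) = _
        exact flatMap_single _ _
      rw [h1, List.filter_map, List.map_map]
      simp [Function.comp_def]
  | succ m ih =>
      rw [Function.iterate_succ_apply', ih]
      show ((prunedK n (m+1)).map (fun t => (t, t.sum))).flatMap _ = _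
      rw [List.flatMap_map]
      unfold prunedK
      rw [flatMap_filter]
      have hsnoc : prodK (PySem.List.pyRange 0 (n+1) 1) (m+1+1)
          = (prodK (PySem.List.pyRange 0 (n+1) 1) (m+1)).flatMap
              (fun t => (PySem.List.pyRange 0 (n+1) 1).map (fun x => t ++ [x])) :=
        prodK_succ_snoc _ _
      rw [hsnoc, List.filter_flatMap, List.map_flatMap]
      apply flatMap_congr_mem
      intro t _
      by_cases h : t.sum ≤ n
      · rw [if_pos (by simpa using h)]
        simp [List.filter_map, List.map_map, Function.comp_def, List.sum_append]
      · rw [if_neg (by simpa using h)]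
        symm
        rw [List.filter_map]
        have hnil2 : (PySem.List.pyRange 0 (n+1) 1).filter
            ((fun u : List Int => decide (u.sum ≤ n)) ∘ (fun x => t ++ [x])) = [] := by
          rw [List.filter_eq_nil_iff]
          intro x hx
          have h0 : (0:Int) ≤ x := (PySem.List.mem_pyRange_one.mp hx).1
          simp only [Function.comp, List.sum_append, List.sum_cons, List.sum_nil, add_zero,
            decide_eq_true_eq]
          omega
        rw [hnil2]
        simp

theorem alt_eq (n k : Int) :
    find_combinations_alt n k
      = (prodK (PySem.List.pyRange 0 (n+1) 1) k.toNat).filter (fun t => t.sum == n) := by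
  unfold find_combinations_alt
  rw [pvLayers_eq_iterate, PySem.List.length_pyRange_one]
  simp only [Int.sub_zero]
  cases hm : k.toNat with
  | zero =>
      show ([(([] : List Int), (0 : Int))].filter (fun p => p.2 == n)).map (fun p => p.1)
        = ([([] : List Int)].filter (fun t => t.sum == n))
      by_cases h : (0 : Int) = n
      · simp [List.filter, ← h]
      · have hb : ((0 : Int) == n) = false := by simpa using h
        simp [List.filter, hb]
  | succ m =>
      rw [iterate_layer]
      rw [List.filter_map, List.map_map]
      have hp : ((fun p : List Int × Int => p.2 == n) ∘ (fun t : List Int => (t, t.sum)))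
          = (fun t : List Int => t.sum == n) := by
        funext t; rfl
      have hf : ((fun p : List Int × Int => p.1) ∘ (fun t : List Int => (t, t.sum)))
          = (fun t : List Int => t) := by
        funext t; rfl
      rw [hp, hf, List.map_id_fun']
      unfold prunedK
      rw [List.filter_filter]
      apply List.filter_congr
      intro t _
      by_cases h : t.sum = n
      · simp [h]
      · simp [h]

-- ===== VERDICT (by name: the statement is the Claim_ definition above) =====
theorem find_combinations_spec : Claim_equal_find_combinations := by
  intro n k _ _
  show find_combinations n k = find_combinations_alt n k
  rw [alt_eq]
  unfold find_combinations
  rw [pvBacktrack_eq]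
  simp
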